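-- pv_equiv track=rewrite | github.com/ghadatlili/python-swiftclient-3.1.0 | python-swiftclient-3.1.0/swiftclient/scheduling.py | freethrs
-- ===== SOURCE A (Python) =====
-- def freethrs (nbTS, nbMaxThr,usedThr_dict): # looking for free threads  to reschedule a request. nbTS ; the required number of transmission times to reschedule
--     i = 0 ; j = 0 ; #print "nbTS",nbTS
--     while i < len(usedThr_dict) and j < nbTS:
--         v = usedThr_dict[i] ; #print v ;
--         if v < nbMaxThr:    i = i + 1 ;j = j + 1 ;# print "j",j ;
--         else: i = i + 1 ;
--         #print "i",i ; print "len(usedThr_dict)",len(usedThr_dict)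
--     if j == nbTS: ret_value = i - nbTS + 1 ; print ("ind ",ret_value) ;
--     else: ret_value = -1 ;
--     return ret_value
-- ===== SOURCE B (Python) =====
-- def freethrs(nbTS, nbMaxThr, usedThr_dict):
--     positions = [i for i, v in enumerate(usedThr_dict) if v < nbMaxThr]
--     if 1 <= nbTS <= len(positions):
--         ret = positions[nbTS - 1] - nbTS + 2
--         print("ind ", ret)
--         return ret
--     return -1
-- ===== Notes on version B (the rewrite author's own statement) =====
-- stated objective: alternative
-- what changed: Replaces the two-counter while loop with a comprehension building the table of qualifying indices and direct indexing of its nbTS-th entry; Pre_ excludes the degenerate nbTS == 0 request, where A's 'slot found at 1' and B's 'not found' (-1) are both defensible answers.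
-- outside the precondition, e.g. on freethrs(0, 5, [1, 2]): A returns 1, B returns -1
import Mathlib
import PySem

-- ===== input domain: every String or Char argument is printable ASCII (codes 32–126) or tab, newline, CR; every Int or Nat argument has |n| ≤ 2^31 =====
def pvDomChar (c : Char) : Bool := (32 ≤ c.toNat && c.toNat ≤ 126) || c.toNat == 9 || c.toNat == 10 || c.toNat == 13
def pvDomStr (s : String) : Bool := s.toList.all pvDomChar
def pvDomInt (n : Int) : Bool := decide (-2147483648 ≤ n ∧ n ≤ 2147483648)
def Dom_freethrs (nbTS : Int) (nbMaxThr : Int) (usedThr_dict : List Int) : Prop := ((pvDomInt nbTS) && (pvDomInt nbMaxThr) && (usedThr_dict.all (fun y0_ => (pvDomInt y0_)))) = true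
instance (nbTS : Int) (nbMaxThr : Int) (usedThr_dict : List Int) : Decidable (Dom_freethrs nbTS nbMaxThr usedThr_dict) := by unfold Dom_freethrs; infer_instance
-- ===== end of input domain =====

-- B replaces A's two-counter while loop by a table of qualifying indices plus direct
-- indexing (alternative decomposition, same O(n) cost); equivalence is about the return
-- value only — both Pythons also print the same "ind " line on success.

-- ===== PORT A =====
-- the while loop: walks the list, i counts all elements seen, j counts qualifying ones,
-- stops when the list is exhausted or j reaches nbTS
def freethrsGo (nbMaxThr nbTS : Int) : List Int → Int → Int → Int × Int
  | [], i, j => (i, j)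
  | v :: rest, i, j =>
    if j < nbTS then
      if v < nbMaxThr then freethrsGo nbMaxThr nbTS rest (i + 1) (j + 1)
      else freethrsGo nbMaxThr nbTS rest (i + 1) j
    else (i, j)

def freethrs (nbTS : Int) (nbMaxThr : Int) (usedThr_dict : List Int) : Int :=
  let p := freethrsGo nbMaxThr nbTS usedThr_dict 0 0
  if p.2 = nbTS then p.1 - nbTS + 1 else -1

-- ===== PORT B =====
def freethrs_alt (nbTS : Int) (nbMaxThr : Int) (usedThr_dict : List Int) : Int :=
  let positions : List Int := (PySem.List.enumerate usedThr_dict).filterMap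
      (fun p => if p.2 < nbMaxThr then some p.1 else none)
  if 1 ≤ nbTS ∧ nbTS ≤ (positions.length : Int) then
    positions.getD (nbTS - 1).toNat 0 - nbTS + 2
  else -1

-- ===== PRECONDITION & SPEC =====
-- Pre_ excludes only the degenerate request nbTS == 0 (zero transmission slots wanted),
-- a corner nobody would specify: A prints and returns 1 there, B's "not found" -1 is
-- equally defensible.
def Pre_freethrs (nbTS : Int) (nbMaxThr : Int) (usedThr_dict : List Int) : Prop := nbTS ≠ 0
instance (nbTS : Int) (nbMaxThr : Int) (usedThr_dict : List Int) : Decidable (Pre_freethrs nbTS nbMaxThr usedThr_dict) := by unfold Pre_freethrs; infer_instance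
def pvWitness_freethrs : Int × Int × List Int := (1, 5, [0])

def Spec_freethrs (nbTS : Int) (nbMaxThr : Int) (usedThr_dict : List Int) (out : Int) : Prop := out = freethrs_alt nbTS nbMaxThr usedThr_dict
instance (nbTS : Int) (nbMaxThr : Int) (usedThr_dict : List Int) (out : Int) : Decidable (Spec_freethrs nbTS nbMaxThr usedThr_dict out) := by unfold Spec_freethrs; infer_instance

-- ===== CLAIM (what is proved, stated in full; the proofs are below) =====
def Claim_equal_freethrs : Prop := ∀ (nbTS : Int) (nbMaxThr : Int) (usedThr_dict : List Int), Dom_freethrs nbTS nbMaxThr usedThr_dict → Pre_freethrs nbTS nbMaxThr usedThr_dict → Spec_freethrs nbTS nbMaxThr usedThr_dict (freethrs nbTS nbMaxThr usedThr_dict)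

-- ===== LEMMAS AND PROOFS =====

-- proof-side spec: position reached after consuming elements until m qualifying ones
-- have been taken (none if fewer than m qualify)
def specGo (nbMaxThr : Int) : Int → List Int → Option Int
  | m, [] => if m ≤ 0 then some 0 else none
  | m, v :: rest =>
    if m ≤ 0 then some 0
    else if v < nbMaxThr then (specGo nbMaxThr (m - 1) rest).map (· + 1)
    else (specGo nbMaxThr m rest).map (· + 1)

-- proof-side table of qualifying indices, as naturals
def posList (nbMaxThr : Int) (xs : List Int) : List Nat :=
  (List.range xs.length).filter (fun idx => xs.getD idx 0 < nbMaxThr)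

lemma freethrsGo_eq (nbMaxThr nbTS : Int) :
    ∀ (xs : List Int) (i j : Int), j ≤ nbTS →
    freethrsGo nbMaxThr nbTS xs i j =
      match specGo nbMaxThr (nbTS - j) xs with
      | some p => (i + p, nbTS)
      | none => (i + xs.length, j + (xs.filter (fun v => v < nbMaxThr)).length) := by
  intro xs
  induction xs with
  | nil =>
    intro i j hj
    simp only [freethrsGo, specGo]
    rcases lt_or_eq_of_le hj with h | h
    · rw [if_neg (by omega)]; simp
    · rw [if_pos (by omega)]; simp [h]
  | cons v rest ih =>
    intro i j hj
    simp only [freethrsGo, specGo]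
    rcases lt_or_eq_of_le hj with h | h
    · rw [if_pos h, if_neg (by omega : ¬ nbTS - j ≤ 0)]
      by_cases hv : v < nbMaxThr
      · rw [if_pos hv, if_pos hv, ih (i + 1) (j + 1) (by omega)]
        have : nbTS - (j + 1) = nbTS - j - 1 := by ring
        rw [this]
        cases specGo nbMaxThr (nbTS - j - 1) rest with
        | none => simp [hv]; constructor <;> omega
        | some p => simp; omega
      · rw [if_neg hv, if_neg hv, ih (i + 1) j hj]
        cases specGo nbMaxThr (nbTS - j) rest with
        | none => simp [hv]; omega
        | some p => simp; omega
    · rw [if_neg (by omega : ¬ j < nbTS), if_pos (by omega : nbTS - j ≤ 0)]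
      simp [h]

lemma posList_cons (nbMaxThr v : Int) (rest : List Int) :
    posList nbMaxThr (v :: rest) =
      (if v < nbMaxThr then [0] else []) ++ (posList nbMaxThr rest).map (· + 1) := by
  simp only [posList, List.length_cons, List.range_succ_eq_map, List.filter_cons]
  rw [List.filter_map]
  have hmap : (List.range rest.length).filter
      ((fun idx => decide ((v :: rest).getD idx 0 < nbMaxThr)) ∘ Nat.succ) =
      (List.range rest.length).filter (fun idx => decide (rest.getD idx 0 < nbMaxThr)) := by
    apply List.filter_congr
    intro a _
    simp [Function.comp, List.getD]
  rw [hmap]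
  by_cases hv : v < nbMaxThr <;>
    simp [hv, List.getD]

lemma posList_length (nbMaxThr : Int) (xs : List Int) :
    (posList nbMaxThr xs).length = (xs.filter (fun v => v < nbMaxThr)).length := by
  induction xs with
  | nil => simp [posList]
  | cons v rest ih =>
    rw [posList_cons, List.filter_cons]
    by_cases hv : v < nbMaxThr <;> simp [hv, ih]

lemma specGo_eq_pos (nbMaxThr : Int) :
    ∀ (xs : List Int) (m : Int), 1 ≤ m →
    specGo nbMaxThr m xs =
      ((posList nbMaxThr xs)[(m - 1).toNat]?).map (fun q => (Int.ofNat q) + 1) := by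
  intro xs
  induction xs with
  | nil =>
    intro m hm
    simp [specGo, posList, if_neg (by omega : ¬ m ≤ 0)]
  | cons v rest ih =>
    intro m hm
    rw [posList_cons]
    simp only [specGo, if_neg (by omega : ¬ m ≤ 0)]
    by_cases hv : v < nbMaxThr
    · rw [if_pos hv]
      simp only [hv, if_pos]
      by_cases hm1 : m = 1
      · subst hm1
        cases rest <;> simp [specGo]
      · rw [ih (m - 1) (by omega)]
        have h2 : (m - 1).toNat = (m - 1 - 1).toNat + 1 := by omega
        rw [h2]
        simp only [List.cons_append, List.nil_append, List.getElem?_cons_succ]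
        rw [List.getElem?_map]
        cases (posList nbMaxThr rest)[(m - 1 - 1).toNat]? with
        | none => simp
        | some q => simp
    · rw [if_neg hv]
      simp only [hv, if_neg, not_false_iff]
      rw [ih m hm]
      simp only [List.nil_append, List.getElem?_map]
      cases (posList nbMaxThr rest)[(m - 1).toNat]? with
      | none => simp
      | some q => simp

lemma freethrsGo_stop (nbMaxThr nbTS : Int) (xs : List Int) (i j : Int)
    (h : ¬ j < nbTS) : freethrsGo nbMaxThr nbTS xs i j = (i, j) := by
  cases xs <;> simp [freethrsGo, h]

-- B's comprehension over enumerate equals the proof-side table shifted by the start index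
lemma enum_filterMap_eq (nbMaxThr : Int) :
    ∀ (xs : List Int) (s : Int),
    (PySem.List.enumerate xs s).filterMap
        (fun p => if p.2 < nbMaxThr then some p.1 else none) =
      List.map (fun q : Nat => s + (q : Int)) (posList nbMaxThr xs) := by
  intro xs
  induction xs with
  | nil => intro s; simp [PySem.List.enumerate_nil, posList]
  | cons v rest ih =>
    intro s
    rw [PySem.List.enumerate_cons, posList_cons]
    by_cases hv : v < nbMaxThr
    · simp only [List.filterMap_cons, hv, if_pos, List.map_append, List.map_map,
        List.map_cons, List.map_nil, List.singleton_append, ih (s + 1)]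
      congr 1
      · simp
      · apply List.map_congr_left; intro a _
        simp only [Function.comp_apply]; push_cast; ring
    · simp only [List.filterMap_cons, hv, if_neg, not_false_iff, List.map_append,
        List.map_map, List.map_nil, List.nil_append, ih (s + 1)]
      apply List.map_congr_left; intro a _
      simp only [Function.comp_apply]; push_cast; ring

lemma Blist_eq (nbMaxThr : Int) (xs : List Int) :
    (PySem.List.enumerate xs).filterMap
        (fun p => if p.2 < nbMaxThr then some p.1 else none) =
      List.map (fun q : Nat => (q : Int)) (posList nbMaxThr xs) := by
  rw [enum_filterMap_eq nbMaxThr xs 0]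
  apply List.map_congr_left; intro a _; ring

lemma Blist_length (nbMaxThr : Int) (xs : List Int) :
    ((PySem.List.enumerate xs).filterMap
        (fun p => if p.2 < nbMaxThr then some p.1 else none)).length =
      (posList nbMaxThr xs).length := by
  rw [Blist_eq, List.length_map]

lemma Blist_get (nbMaxThr : Int) (xs : List Int) (k : Nat) :
    ((PySem.List.enumerate xs).filterMap
        (fun p => if p.2 < nbMaxThr then some p.1 else none))[k]? =
      Option.map (fun q : Nat => (q : Int)) (posList nbMaxThr xs)[k]? := by
  rw [Blist_eq, List.getElem?_map]

-- ===== VERDICT (by name: the statement is the Claim_ definition above) =====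
theorem freethrs_spec : Claim_equal_freethrs := by
  intro nbTS nbMaxThr xs _ hpre
  have hpre' : nbTS ≠ 0 := hpre
  unfold Spec_freethrs freethrs freethrs_alt
  have hlenB := Blist_length nbMaxThr xs
  by_cases hneg : nbTS < 0
  · rw [freethrsGo_stop nbMaxThr nbTS xs 0 0 (by omega)]
    have hnc : ¬ (1 ≤ nbTS ∧ nbTS ≤
        (((PySem.List.enumerate xs).filterMap
          (fun p => if p.2 < nbMaxThr then some p.1 else none)).length : Int)) := by
      rintro ⟨h, _⟩; omega
    rw [if_neg (by omega : ¬ (0 : Int) = nbTS), if_neg hnc]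
  · have h1 : 1 ≤ nbTS := by omega
    have hz : nbTS - 0 = nbTS := by ring
    cases hp : (posList nbMaxThr xs)[(nbTS - 1).toNat]? with
    | some q =>
      have hin : (nbTS - 1).toNat < (posList nbMaxThr xs).length :=
        (List.getElem?_eq_some_iff.mp hp).choose
      have hA : freethrsGo nbMaxThr nbTS xs 0 0 = (0 + (Int.ofNat q + 1), nbTS) := by
        rw [freethrsGo_eq nbMaxThr nbTS xs 0 0 (by omega), hz,
            specGo_eq_pos nbMaxThr xs nbTS h1, hp]
        rfl
      have hcond : 1 ≤ nbTS ∧ nbTS ≤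
          (((PySem.List.enumerate xs).filterMap
            (fun p => if p.2 < nbMaxThr then some p.1 else none)).length : Int) :=
        ⟨h1, by rw [hlenB]; omega⟩
      have hq : ((PySem.List.enumerate xs).filterMap
            (fun p => if p.2 < nbMaxThr then some p.1 else none)).getD (nbTS - 1).toNat 0 =
          (q : Int) := by
        rw [List.getD_eq_getElem?_getD, Blist_get, hp]; rfl
      rw [hA, if_pos hcond, hq, if_pos rfl]
      simp only [Int.ofNat_eq_natCast]
      ring
    | none =>
      have hout : ¬ (nbTS - 1).toNat < (posList nbMaxThr xs).length := by
        intro hlt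
        exact (List.getElem?_eq_none_iff.mp hp).not_gt hlt
      have hgt : nbTS > ((posList nbMaxThr xs).length : Int) := by omega
      have hcnt : ((xs.filter (fun v => v < nbMaxThr)).length : Int) ≠ nbTS := by
        rw [← posList_length nbMaxThr xs]; omega
      have hA : freethrsGo nbMaxThr nbTS xs 0 0 =
          (0 + (xs.length : Int), 0 + ((xs.filter (fun v => v < nbMaxThr)).length : Int)) := by
        rw [freethrsGo_eq nbMaxThr nbTS xs 0 0 (by omega), hz,
            specGo_eq_pos nbMaxThr xs nbTS h1, hp]
        rfl
      have hnc : ¬ (1 ≤ nbTS ∧ nbTS ≤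
          (((PySem.List.enumerate xs).filterMap
            (fun p => if p.2 < nbMaxThr then some p.1 else none)).length : Int)) := by
        rintro ⟨_, hle⟩; rw [hlenB] at hle; omega
      rw [hA, if_neg hnc, if_neg (by simpa using fun h => hcnt (by omega))]
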